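-- pv_equiv track=rewrite | github.com/tchtinku/Ace_Programming | Strings/FindKthCharacterDecryptedString/WithoutDecryption/FindKthCharacterDecryption.py | find_kth_character
-- ===== SOURCE A (Python) =====
-- def find_kth_character(S, K):
--     i=0
--     while i<len(S):
--         # Find the substring
--         substring = ""
--         while i<len(S) and S[i].isalpha():
--             substring += S[i]
--             i += 1
--
--         # Find the frequency
--         freq = 0
--         while i < len(S) and S[i].isdigit():
--             freq = freq * 10 + int(S[i])
--             i += 1
--
--         # Calculate the resultant length
--         result_length  = len(substring)*freq
--
--         if K <= result_length:
--             # Kth character lies in this substring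
--             return substring[(K-1)%len(substring)]
--
--         # Update K for the next part of the string
--         K -= result_length
--
--     return "" # Return empty if K is out of bounds
-- ===== SOURCE B (Python) =====
-- def find_kth_character(S, K):
--     # Phase 1: tokenize S into parallel arrays: subs[t] and prefix[t+1] = total
--     # expanded length of the first t+1 tokens (prefix[0] = 0).
--     subs = []
--     prefix = [0]
--     i, n = 0, len(S)
--     while i < n:
--         j = i
--         while j < n and S[j].isalpha():
--             j += 1
--         sub = S[i:j]
--         freq = 0
--         while j < n and S[j].isdigit():
--             freq = freq * 10 + int(S[j])
--             j += 1
--         subs.append(sub)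
--         prefix.append(prefix[-1] + len(sub) * freq)
--         i = j
--     # Phase 2: binary search for the first token t with K <= prefix[t+1]
--     # (prefix is nondecreasing, so the predicate is monotone).
--     lo, hi = 0, len(subs)
--     while lo < hi:
--         mid = (lo + hi) // 2
--         if K <= prefix[mid + 1]:
--             hi = mid
--         else:
--             lo = mid + 1
--     if lo == len(subs):
--         return ""
--     return subs[lo][(K - prefix[lo] - 1) % len(subs[lo])]
-- ===== Notes on version B (the rewrite author's own statement) =====
-- stated objective: faster
-- what changed: A's single interleaved loop that mutates K and decides per segment is replaced by a tokenize pass that takes each letter run as one slice S[i:j] (instead of A's quadratic per-character substring += c) building parallel substring/prefix-sum arrays, followed by a BINARY SEARCH over the monotone prefix sums to locate K's token with one modular index, K untouched.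
-- outside the precondition, e.g. on find_kth_character('b cx', -2): A returns 'b', B does not finish within the time limit
import Mathlib
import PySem

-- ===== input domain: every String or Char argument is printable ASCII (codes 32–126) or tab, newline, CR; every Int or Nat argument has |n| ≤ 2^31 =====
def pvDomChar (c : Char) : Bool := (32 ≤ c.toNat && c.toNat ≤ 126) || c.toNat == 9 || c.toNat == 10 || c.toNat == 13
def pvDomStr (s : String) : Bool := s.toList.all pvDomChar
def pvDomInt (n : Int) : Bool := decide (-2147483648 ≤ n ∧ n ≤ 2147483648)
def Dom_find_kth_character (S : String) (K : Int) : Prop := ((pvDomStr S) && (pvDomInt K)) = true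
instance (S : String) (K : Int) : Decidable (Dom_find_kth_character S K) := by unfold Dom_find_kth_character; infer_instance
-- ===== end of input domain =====

-- B replaces A's single interleaved scan (which mutates K and decides per segment) by a tokenize pass
-- taking each letter run as one slice (instead of A's per-character substring concatenation), building
-- parallel substring / prefix-sum arrays, then a binary search over the monotone prefix sums;
-- objective: faster (measured) and a different locate algorithm.

-- int(c) for a single character c; exact for digit characters, the only case the
-- isdigit guard in both programs lets through.
def pvDigitVal (c : Char) : Int := (c.toNat : Int) - 48

-- ===== PORT A =====
-- A's outer while interleaves: consume an alpha run, consume a digit run, then decide/return or loop.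
-- fuel = remaining-length bound; on all-alphanumeric input (Pre_) every outer pass consumes ≥ 1 char.
def pvA_loop (l : List Char) (K : Int) (fuel : Nat) : String :=
  match fuel with
  | 0 => ""  -- unreachable under Pre_ (Python A loops forever on a non-alphanumeric char)
  | fuel + 1 =>
    match l with
    | [] => ""
    | _ :: _ =>
      let sub := l.takeWhile PySem.Chars.isalpha
      let r := l.dropWhile PySem.Chars.isalpha
      let digs := r.takeWhile PySem.Chars.isdigit
      let rest := r.dropWhile PySem.Chars.isdigit
      let freq := digs.foldl (fun a c => a * 10 + pvDigitVal c) 0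
      let rl : Int := (sub.length : Int) * freq
      if K ≤ rl then
        match PySem.List.pyGet? sub (PySem.Int.mod (K - 1) (sub.length : Int)) with
        | some c => String.ofList [c]
        | none => ""  -- Python raises ZeroDivisionError here (sub = ""); excluded by Pre_
      else pvA_loop rest (K - rl) fuel

def find_kth_character (S : String) (K : Int) : String :=
  pvA_loop S.toList K (S.toList.length + 1)

-- ===== PORT B =====
-- phase 1: tokenize into parallel arrays subs and prefix (prefix[0] = 0, prefix[t+1] =
-- expanded length of the first t+1 tokens); fuel as in port A.
def pvB_tok (fuel : Nat) (l : List Char) (subs : List (List Char)) (pre : List Int) :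
    List (List Char) × List Int :=
  match fuel with
  | 0 => (subs, pre)  -- unreachable under Pre_ (Python B loops forever on a non-alphanumeric char)
  | fuel + 1 =>
    match l with
    | [] => (subs, pre)
    | _ :: _ =>
      let sub := l.takeWhile PySem.Chars.isalpha
      let r := l.dropWhile PySem.Chars.isalpha
      let digs := r.takeWhile PySem.Chars.isdigit
      let rest := r.dropWhile PySem.Chars.isdigit
      let freq := digs.foldl (fun a c => a * 10 + pvDigitVal c) 0
      pvB_tok fuel rest (subs ++ [sub]) (pre ++ [pre.getLastD 0 + (sub.length : Int) * freq])

-- phase 2: binary search for the first t with K <= prefix[t+1]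
def pvB_bs (pre : List Int) (K : Int) (lo hi : Nat) : Nat :=
  if h : lo < hi then
    let mid := (lo + hi) / 2
    if K ≤ pre.getD (mid + 1) 0 then pvB_bs pre K lo mid
    else pvB_bs pre K (mid + 1) hi
  else lo
termination_by hi - lo
decreasing_by all_goals omega

-- the final pick (tail of Source B)
def pvPick (subs : List (List Char)) (pre : List Int) (K : Int) (lo : Nat) : String :=
  if lo = subs.length then ""
  else
    let sub := subs.getD lo []
    match PySem.List.pyGet? sub (PySem.Int.mod (K - pre.getD lo 0 - 1) (sub.length : Int)) with
    | some c => String.ofList [c]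
    | none => ""  -- ZeroDivisionError in Python (sub = ""); excluded by Pre_

def find_kth_character_alt (S : String) (K : Int) : String :=
  let tp := pvB_tok (S.toList.length + 1) S.toList [] [0]
  pvPick tp.1 tp.2 K (pvB_bs tp.2 K 0 tp.1.length)

-- ===== PRECONDITION & SPEC =====
-- Pre_ excludes strings with a non-alphanumeric character (Python A loops forever on them, except that
-- with K ≤ 0 A can return an accidental wrapped character from the first letter-run before reaching the
-- bad character, where B's whole-string tokenizer diverges) and K ≤ 0 on digit-led strings
-- (A raises ZeroDivisionError).
def Pre_find_kth_character (S : String) (K : Int) : Prop :=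
  S.toList.all PySem.Chars.isalnum = true ∧
  (K ≤ 0 → ∀ c ∈ S.toList.take 1, PySem.Chars.isdigit c = false)
instance (S : String) (K : Int) : Decidable (Pre_find_kth_character S K) := by
  unfold Pre_find_kth_character; infer_instance

def pvWitness_find_kth_character : String × Int := ("geeks2for3", 8)

def Spec_find_kth_character (S : String) (K : Int) (out : String) : Prop := out = find_kth_character_alt S K
instance (S : String) (K : Int) (out : String) : Decidable (Spec_find_kth_character S K out) := by unfold Spec_find_kth_character; infer_instance

-- ===== CLAIM (what is proved, stated in full; the proofs are below) =====
def Claim_equal_find_kth_character : Prop := ∀ (S : String) (K : Int), Dom_find_kth_character S K → Pre_find_kth_character S K → Spec_find_kth_character S K (find_kth_character S K)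

-- ===== LEMMAS AND PROOFS =====

-- reference token list: the recursive decomposition both ports compute run by run
def pvTok (fuel : Nat) (l : List Char) : List (List Char × Int) :=
  match fuel with
  | 0 => []
  | fuel + 1 =>
    match l with
    | [] => []
    | _ :: _ =>
      let sub := l.takeWhile PySem.Chars.isalpha
      let r := l.dropWhile PySem.Chars.isalpha
      let digs := r.takeWhile PySem.Chars.isdigit
      let rest := r.dropWhile PySem.Chars.isdigit
      (sub, digs.foldl (fun a c => a * 10 + pvDigitVal c) 0) :: pvTok fuel rest

-- reference linear locate
def pvRef : List (List Char × Int) → Int → Int → String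
  | [], _, _ => ""
  | (sub, f) :: rest, K, total =>
    let nxt := total + (sub.length : Int) * f
    if K ≤ nxt then
      match PySem.List.pyGet? sub (PySem.Int.mod (K - total - 1) (sub.length : Int)) with
      | some c => String.ofList [c]
      | none => ""
    else pvRef rest K nxt

-- prefix sums of expanded lengths, starting from a
def pvPre_ : List (List Char × Int) → Int → List Int
  | [], _ => []
  | (s, f) :: rest, a => (a + (s.length : Int) * f) :: pvPre_ rest (a + (s.length : Int) * f)

lemma pvPre_length (toks : List (List Char × Int)) : ∀ a, (pvPre_ toks a).length = toks.length := by
  induction toks with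
  | nil => intro a; rfl
  | cons t r ih => intro a; obtain ⟨s, f⟩ := t; simp [pvPre_, ih]

-- the locate phase depends only on K - total
lemma pvRef_shift (ps : List (List Char × Int)) :
    ∀ (K total d : Int), pvRef ps (K - d) (total - d) = pvRef ps K total := by
  induction ps with
  | nil => intro K total d; rfl
  | cons p rest ih =>
    intro K total d
    obtain ⟨sub, f⟩ := p
    simp only [pvRef]
    have hi : (K - d - (total - d) - 1) = (K - total - 1) := by ring
    rw [hi]
    by_cases h : K ≤ total + (sub.length : Int) * f
    · rw [if_pos (by omega : K - d ≤ total - d + (sub.length : Int) * f), if_pos h]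
    · rw [if_neg (by omega : ¬ K - d ≤ total - d + (sub.length : Int) * f), if_neg h]
      have h2 : total - d + (sub.length : Int) * f = (total + (sub.length : Int) * f) - d := by ring
      rw [h2, ih K (total + (sub.length : Int) * f) d]

-- A's loop is exactly the linear locate over the reference tokens (same fuel, no side condition)
lemma pvA_eq_ref : ∀ (fuel : Nat) (l : List Char) (K : Int),
    pvA_loop l K fuel = pvRef (pvTok fuel l) K 0 := by
  intro fuel
  induction fuel with
  | zero => intro l K; rfl
  | succ fuel ih =>
    intro l K
    rcases l with _ | ⟨c, m⟩
    · rfl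
    · simp only [pvA_loop, pvTok, pvRef, zero_add, sub_zero]
      split_ifs with h
      · rfl
      · rw [ih]
        have := pvRef_shift
          (pvTok fuel (((c :: m).dropWhile PySem.Chars.isalpha).dropWhile PySem.Chars.isdigit)) K
          (((c :: m).takeWhile PySem.Chars.isalpha).length *
            ((((c :: m).dropWhile PySem.Chars.isalpha).takeWhile PySem.Chars.isdigit).foldl
              (fun a c => a * 10 + pvDigitVal c) 0))
          (((c :: m).takeWhile PySem.Chars.isalpha).length *
            ((((c :: m).dropWhile PySem.Chars.isalpha).takeWhile PySem.Chars.isdigit).foldl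
              (fun a c => a * 10 + pvDigitVal c) 0))
        simp only [sub_self] at this
        exact this

-- B's tokenizer with accumulators produces the reference tokens' parallel arrays
lemma pvB_tok_acc : ∀ (fuel : Nat) (l : List Char) (subs : List (List Char)) (pre : List Int)
    (a : Int), pre ≠ [] → pre.getLastD 0 = a →
    pvB_tok fuel l subs pre = (subs ++ (pvTok fuel l).map Prod.fst, pre ++ pvPre_ (pvTok fuel l) a) := by
  intro fuel
  induction fuel with
  | zero => intro l subs pre a _ _; simp [pvB_tok, pvTok, pvPre_]
  | succ fuel ih =>
    intro l subs pre a hne hlast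
    rcases l with _ | ⟨c, m⟩
    · simp [pvB_tok, pvTok, pvPre_]
    · simp only [pvB_tok, pvTok, pvPre_]
      rw [hlast]
      rw [ih _ _ _ (a + (((c :: m).takeWhile PySem.Chars.isalpha).length : Int) *
          ((((c :: m).dropWhile PySem.Chars.isalpha).takeWhile PySem.Chars.isdigit).foldl
            (fun a c => a * 10 + pvDigitVal c) 0))
        (by simp) (by simp)]
      simp

-- every token frequency is nonnegative (digit runs only)
lemma pv_freq_nonneg_fold (digs : List Char) (h : ∀ c ∈ digs, PySem.Chars.isdigit c = true) :
    ∀ (a : Int), 0 ≤ a → 0 ≤ digs.foldl (fun a c => a * 10 + pvDigitVal c) a := by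
  induction digs with
  | nil => intro a ha; simpa using ha
  | cons c m ih =>
    intro a ha
    have hc := h c (by simp)
    have hv : 0 ≤ pvDigitVal c := by
      simp only [PySem.Chars.isdigit, Bool.and_eq_true, decide_eq_true_eq] at hc
      have h1 := hc.1
      rw [Char.le_def, UInt32.le_iff_toNat_le] at h1
      have e0 : '0'.val.toNat = 48 := rfl
      have : c.toNat = c.val.toNat := rfl
      simp only [pvDigitVal]
      omega
    simp only [List.foldl_cons]
    exact ih (fun x hx => h x (by simp [hx])) (a * 10 + pvDigitVal c) (by omega)

lemma pv_tok_freq_nonneg : ∀ (fuel : Nat) (l : List Char) (p : List Char × Int),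
    p ∈ pvTok fuel l → 0 ≤ p.2 := by
  intro fuel
  induction fuel with
  | zero => intro l p hp; simp [pvTok] at hp
  | succ fuel ih =>
    intro l p hp
    rcases l with _ | ⟨c, m⟩
    · simp [pvTok] at hp
    · simp only [pvTok, List.mem_cons] at hp
      rcases hp with hp | hp
      · subst hp
        exact pv_freq_nonneg_fold _ (fun x hx => List.mem_takeWhile_imp hx) 0 le_rfl
      · exact ih _ _ hp

-- the prefix array 0 :: prefix-sums is nondecreasing (in range)
lemma pv_pre_mono (toks : List (List Char × Int)) (hf : ∀ p ∈ toks, 0 ≤ p.2) :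
    ∀ (a : Int) (i j : Nat), i ≤ j → j < (a :: pvPre_ toks a).length →
      (a :: pvPre_ toks a).getD i 0 ≤ (a :: pvPre_ toks a).getD j 0 := by
  induction toks with
  | nil =>
    intro a i j hij hj
    have hj' : j < 1 := by simpa [pvPre_] using hj
    obtain rfl : j = 0 := by omega
    obtain rfl : i = 0 := by omega
    exact le_refl _
  | cons t r ih =>
    intro a i j hij hj
    obtain ⟨s, f⟩ := t
    have hf0 : (0 : Int) ≤ f := hf (s, f) (by simp)
    have hstep : a ≤ a + (s.length : Int) * f := by
      have := mul_nonneg (Int.natCast_nonneg s.length) hf0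
      omega
    rcases i with _ | i
    · rcases j with _ | j
      · simp
      · have := ih (fun p hp => hf p (by simp [hp])) (a + (s.length : Int) * f) 0 j
          (by omega) (by simpa [pvPre_] using hj)
        simp only [pvPre_, List.getD_cons_succ, List.getD_cons_zero] at this ⊢
        omega
    · rcases j with _ | j
      · omega
      · have := ih (fun p hp => hf p (by simp [hp])) (a + (s.length : Int) * f) i j
          (by omega) (by simpa [pvPre_] using hj)
        simpa [pvPre_] using this

-- shifting lemmas for the prefix-sum list
lemma pvPre_shift : ∀ (ts : List (List Char × Int)) (a d : Int),
    pvPre_ ts (a + d) = (pvPre_ ts a).map (· + d) := by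
  intro ts
  induction ts with
  | nil => intro a d; rfl
  | cons t r ih =>
    intro a d
    obtain ⟨s, f⟩ := t
    simp only [pvPre_, List.map_cons]
    have h1 : a + d + (s.length : Int) * f = a + (s.length : Int) * f + d := by ring
    rw [h1, ih (a + (s.length : Int) * f) d]

lemma pv_pre_getD_shift (ts : List (List Char × Int)) (c0 : Int) (j : Nat)
    (hj : j < ts.length) :
    (pvPre_ ts c0).getD j 0 = (pvPre_ ts 0).getD j 0 + c0 := by
  have h0 : pvPre_ ts c0 = (pvPre_ ts 0).map (· + c0) := by
    have := pvPre_shift ts 0 c0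
    simpa using this
  have hj0 : j < (pvPre_ ts 0).length := by rw [pvPre_length]; exact hj
  have hjm : j < ((pvPre_ ts 0).map (· + c0)).length := by simpa using hj0
  rw [h0, List.getD_eq_getElem _ 0 hjm, List.getElem_map, List.getD_eq_getElem _ 0 hj0]

-- binary search characterization: pvB_bs returns the least index in [lo,hi] whose
-- successor prefix entry admits K (or hi if none), given in-range monotonicity
lemma pvB_bs_spec (pre : List Int) (K : Int)
    (hmono : ∀ i j : Nat, i ≤ j → j + 1 < pre.length →
      K ≤ pre.getD (i + 1) 0 → K ≤ pre.getD (j + 1) 0) :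
    ∀ (n lo hi : Nat), hi - lo ≤ n → lo ≤ hi → hi + 1 ≤ pre.length →
      lo ≤ pvB_bs pre K lo hi ∧ pvB_bs pre K lo hi ≤ hi ∧
      (pvB_bs pre K lo hi < hi → K ≤ pre.getD (pvB_bs pre K lo hi + 1) 0) ∧
      (∀ j, lo ≤ j → j < pvB_bs pre K lo hi → ¬ K ≤ pre.getD (j + 1) 0) := by
  intro n
  induction n with
  | zero =>
    intro lo hi hn hlh _
    have he : lo = hi := by omega
    subst he
    rw [pvB_bs, dif_neg (by omega : ¬ lo < lo)]
    exact ⟨le_refl _, le_refl _, by omega, by omega⟩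
  | succ n ih =>
    intro lo hi hn hlh hpre
    by_cases h : lo < hi
    · rw [pvB_bs, dif_pos h]
      simp only
      have hm1 : lo ≤ (lo + hi) / 2 := by omega
      have hm2 : (lo + hi) / 2 < hi := by omega
      by_cases hp : K ≤ pre.getD ((lo + hi) / 2 + 1) 0
      · rw [if_pos hp]
        have hrec := ih lo ((lo + hi) / 2) (by omega) hm1 (by omega)
        refine ⟨hrec.1, by omega, ?_, hrec.2.2.2⟩
        intro _
        rcases lt_or_eq_of_le hrec.2.1 with h' | h'
        · exact hrec.2.2.1 h'
        · rw [h']; exact hp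
      · rw [if_neg hp]
        have hrec := ih ((lo + hi) / 2 + 1) hi (by omega) (by omega) hpre
        refine ⟨by omega, hrec.2.1, hrec.2.2.1, ?_⟩
        intro j hj hjr hKj
        by_cases hjm : (lo + hi) / 2 + 1 ≤ j
        · exact hrec.2.2.2 j hjm hjr hKj
        · exact hp (hmono j ((lo + hi) / 2) (by omega) (by omega) hKj)
    · rw [pvB_bs, dif_neg h]
      exact ⟨le_refl _, by omega, by omega, by omega⟩

-- the linear locate equals the pick at the least admitting index
lemma pvRef_eq_pick : ∀ (toks : List (List Char × Int)) (K : Int) (r : Nat),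
    r ≤ toks.length →
    (∀ j, j < r → ¬ K ≤ (0 :: pvPre_ toks 0).getD (j + 1) 0) →
    (r < toks.length → K ≤ (0 :: pvPre_ toks 0).getD (r + 1) 0) →
    pvRef toks K 0 = pvPick (toks.map Prod.fst) (0 :: pvPre_ toks 0) K r := by
  intro toks
  induction toks with
  | nil =>
    intro K r hr _ _
    have : r = 0 := by simp at hr; omega
    subst this
    simp [pvRef, pvPick]
  | cons t ts ih =>
    intro K r hr hmin hhit
    obtain ⟨s, f⟩ := t
    have hc0 : pvPre_ ((s, f) :: ts) 0 = (0 + (s.length : Int) * f) :: pvPre_ ts (0 + (s.length : Int) * f) := rfl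
    rcases r with _ | r'
    · -- the first token admits K
      have hk : K ≤ (s.length : Int) * f := by
        have := hhit (by simp)
        simpa [hc0] using this
      simp only [pvRef, pvPick, List.map_cons]
      rw [if_pos (by omega : K ≤ 0 + (s.length : Int) * f),
          if_neg (by simp : ¬ (0 : Nat) = ((s :: ts.map Prod.fst).length))]
      simp only [List.getD_cons_zero]
    · -- the first token does not admit K: recurse with K shifted by its length
      have hk : ¬ K ≤ (s.length : Int) * f := by
        have := hmin 0 (by omega)
        simpa [hc0] using this
      have hr' : r' ≤ ts.length := by simpa using hr
      -- step of pvRef, then normalize the running total back to 0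
      have hstep : pvRef ((s, f) :: ts) K 0 = pvRef ts (K - (s.length : Int) * f) 0 := by
        simp only [pvRef, zero_add]
        rw [if_neg hk]
        have := pvRef_shift ts K ((s.length : Int) * f) ((s.length : Int) * f)
        simp only [sub_self] at this
        exact this.symm
      rw [hstep]
      -- getD bridges between the cons list and the tail list
      have hbridge : ∀ j : Nat, j < ts.length →
          (0 :: pvPre_ ((s, f) :: ts) 0).getD (j + 2) 0 =
            (0 :: pvPre_ ts 0).getD (j + 1) 0 + (s.length : Int) * f := by
        intro j hj
        rw [hc0]
        simp only [List.getD_cons_succ]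
        rw [pv_pre_getD_shift ts (0 + (s.length : Int) * f) j hj]
        omega
      rw [ih (K - (s.length : Int) * f) r' hr'
        (by
          intro j hj
          have hjlt : j < ts.length := by omega
          have h1 := hmin (j + 1) (by omega)
          rw [hbridge j hjlt] at h1
          omega)
        (by
          intro hlt
          have h1 := hhit (by simpa using hlt)
          rw [hbridge r' hlt] at h1
          omega)]
      -- both picks coincide
      simp only [pvPick, List.map_cons, List.length_cons, List.length_map]
      by_cases hend : r' = ts.length
      · rw [if_pos (by simpa using hend), if_pos (by simp [hend])]
      · rw [if_neg (by simp at *; omega),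
            if_neg (by simp at *; omega)]
        simp only [List.getD_cons_succ]
        have hrlt : r' < ts.length := by omega
        have hgd : (pvPre_ ((s, f) :: ts) 0).getD r' 0 =
            (0 :: pvPre_ ts 0).getD r' 0 + (s.length : Int) * f := by
          rw [hc0]
          rcases r' with _ | r''
          · simp
          · simp only [List.getD_cons_succ]
            rw [pv_pre_getD_shift ts (0 + (s.length : Int) * f) r'' (by omega)]
            omega
        rw [hgd]
        have : K - ((0 :: pvPre_ ts 0).getD r' 0 + (s.length : Int) * f) - 1 =
            K - (s.length : Int) * f - (0 :: pvPre_ ts 0).getD r' 0 - 1 := by ring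
        rw [this]

-- ===== VERDICT (by name: the statement is the Claim_ definition above) =====
theorem find_kth_character_spec : Claim_equal_find_kth_character := by
  intro S K _ _
  unfold Spec_find_kth_character find_kth_character find_kth_character_alt
  have htok := pvB_tok_acc (S.toList.length + 1) S.toList [] [0] 0 (by simp) (by simp)
  rw [htok]
  simp only [List.nil_append, List.singleton_append]
  have hlen : ((pvTok (S.toList.length + 1) S.toList).map Prod.fst).length =
      (pvTok (S.toList.length + 1) S.toList).length := by simp
  rw [hlen]
  set toks := pvTok (S.toList.length + 1) S.toList with htoks
  have hprel : (0 :: pvPre_ toks 0).length = toks.length + 1 := by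
    simp [pvPre_length]
  have hmono : ∀ i j : Nat, i ≤ j → j + 1 < (0 :: pvPre_ toks 0).length →
      K ≤ (0 :: pvPre_ toks 0).getD (i + 1) 0 → K ≤ (0 :: pvPre_ toks 0).getD (j + 1) 0 := by
    intro i j hij hj hK
    have := pv_pre_mono toks (fun p hp => pv_tok_freq_nonneg _ _ p hp) 0 (i + 1) (j + 1)
      (by omega) hj
    omega
  have hbs := pvB_bs_spec (0 :: pvPre_ toks 0) K hmono toks.length 0 toks.length
    (by omega) (by omega) (by omega)
  rw [pvA_eq_ref]
  exact pvRef_eq_pick toks K (pvB_bs (0 :: pvPre_ toks 0) K 0 toks.length)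
    hbs.2.1
    (fun j hj => hbs.2.2.2 j (by omega) hj)
    hbs.2.2.1
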